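-- pv_equiv track=rewrite | github.com/saraxmartin/ComputerLogics | Task1_1.py | PositionMainConnector
-- ===== SOURCE A (Python) =====
-- def IsOpeningBracket(char):
--     return (char=="(")
--
-- def IsClosingBracket(char):
--     return (char==")")
--
-- def IsConnector(char):
--     return (char=="|" or char=="&" or char=="-" or char=="+")
--
-- def PositionMainConnector(expression):
--     positionMainConnector = None
--     numberOfBrackets = 0
--     for i in range(len(expression)):
--         char=expression[i]
--         if IsOpeningBracket(char)==True:
--             numberOfBrackets += 1
--         elif IsClosingBracket(char)==True:
--             numberOfBrackets -= 1
--         elif (IsConnector(char)==True) and (numberOfBrackets == 1):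
--             positionMainConnector = i
--             break
--     return positionMainConnector
-- ===== SOURCE B (Python) =====
-- def PositionMainConnector(expression):
--     # No running depth state: at each connector occurrence, the bracket depth is
--     # re-derived from scratch by counting the parentheses in the prefix before it.
--     for i, ch in enumerate(expression):
--         if ch in "|&-+":
--             prefix = expression[:i]
--             if prefix.count("(") - prefix.count(")") == 1:
--                 return i
--     return None
-- ===== Notes on version B (the rewrite author's own statement) =====
-- stated objective: alternative
-- what changed: B keeps no running bracket counter at all: at each connector occurrence it re-derives the depth by counting opening and closing parentheses in the prefix expression[:i] with str.count, a stateless prefix-counting algorithm instead of A's inline stateful scan.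
import Mathlib
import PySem

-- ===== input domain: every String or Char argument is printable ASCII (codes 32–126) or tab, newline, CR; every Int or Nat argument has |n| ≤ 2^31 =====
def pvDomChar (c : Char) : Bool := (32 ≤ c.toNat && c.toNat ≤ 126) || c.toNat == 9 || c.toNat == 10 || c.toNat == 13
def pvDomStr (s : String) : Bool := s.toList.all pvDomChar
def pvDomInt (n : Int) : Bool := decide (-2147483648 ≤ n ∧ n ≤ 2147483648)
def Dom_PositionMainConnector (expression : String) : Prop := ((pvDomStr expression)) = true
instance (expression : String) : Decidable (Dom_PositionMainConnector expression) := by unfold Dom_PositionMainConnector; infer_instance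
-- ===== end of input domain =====

-- B replaces A's running bracket counter by stateless prefix counting: at each connector
-- it re-derives the depth by counting '(' and ')' in expression[:i]; same values everywhere.

-- ===== PORT A =====
def pvIsOpeningBracket (c : Char) : Bool := c == '('
def pvIsClosingBracket (c : Char) : Bool := c == ')'
def pvIsConnector (c : Char) : Bool := c == '|' || c == '&' || c == '-' || c == '+'

-- A's for-loop with break, as structural recursion over the remaining chars with index i and bracket count n
def pvLoopA : List Char → Int → Int → Option Int
  | [], _, _ => none
  | c :: rest, i, n =>
    if pvIsOpeningBracket c then pvLoopA rest (i + 1) (n + 1)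
    else if pvIsClosingBracket c then pvLoopA rest (i + 1) (n - 1)
    else if pvIsConnector c && n == 1 then some i
    else pvLoopA rest (i + 1) n

def PositionMainConnector (expression : String) : Option Int :=
  pvLoopA expression.toList 0 0

-- ===== PORT B =====
-- Source B's 'for i, ch in enumerate(expression)' loop: recursion over the remaining chars with
-- the enumerate counter i; 'full' is the whole expression, kept so that expression[:i] and
-- the two .count calls can be transcribed (for a single-char needle, str.count is List.count
-- of that char, exact on every input).
def pvScanB : List Char → Nat → List Char → Option Int
  | [], _, _ => none
  | c :: rest, i, full =>
    if c == '|' || c == '&' || c == '-' || c == '+' then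
      if ((((full.take i).count '(' : Int)) - (((full.take i).count ')' : Int))) == 1 then
        some (i : Int)
      else pvScanB rest (i + 1) full
    else pvScanB rest (i + 1) full

def PositionMainConnector_alt (expression : String) : Option Int :=
  pvScanB expression.toList 0 expression.toList

-- ===== PRECONDITION & SPEC =====
def Spec_PositionMainConnector (expression : String) (out : Option Int) : Prop := out = PositionMainConnector_alt expression
instance (expression : String) (out : Option Int) : Decidable (Spec_PositionMainConnector expression out) := by unfold Spec_PositionMainConnector; infer_instance

-- ===== CLAIM (what is proved, stated in full; the proofs are below) =====
def Claim_equal_PositionMainConnector : Prop := ∀ (expression : String), Dom_PositionMainConnector expression → Spec_PositionMainConnector expression (PositionMainConnector expression)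

-- ===== LEMMAS AND PROOFS =====
-- bracket balance of a prefix, the quantity B recomputes by counting
def pvBal (cs : List Char) : Int := (cs.count '(' : Int) - (cs.count ')' : Int)

theorem pvBal_open (pre : List Char) : pvBal (pre ++ ['(']) = pvBal pre + 1 := by
  simp [pvBal, List.count_append]; omega

theorem pvBal_close (pre : List Char) : pvBal (pre ++ [')']) = pvBal pre - 1 := by
  simp [pvBal, List.count_append]; omega

theorem pvBal_other (pre : List Char) (c : Char) (hop : c ≠ '(') (hcl : c ≠ ')') :
    pvBal (pre ++ [c]) = pvBal pre := by
  simp [pvBal, List.count_append, hop, hcl]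

-- Invariant linking A's running counter to B's prefix counting: when A's state (i, n) is the
-- length and bracket balance of the consumed prefix, the two loops return the same result.
theorem pvLoopA_eq_scanB (suffix : List Char) : ∀ (pre : List Char),
    pvLoopA suffix (pre.length : Int) (pvBal pre) = pvScanB suffix pre.length (pre ++ suffix) := by
  induction suffix with
  | nil => intro pre; rfl
  | cons c rest ih =>
    intro pre
    have htake : ((pre ++ c :: rest).take pre.length) = pre := by
      simp [List.take_append_of_le_length (le_refl pre.length)]
    have hstep : pvLoopA rest ((pre.length : Int) + 1) (pvBal (pre ++ [c]))
        = pvScanB rest (pre.length + 1) (pre ++ c :: rest) := by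
      have h := ih (pre ++ [c])
      simpa using h
    simp only [pvLoopA, pvScanB, pvIsOpeningBracket, pvIsClosingBracket, pvIsConnector, htake]
    by_cases hop : c = '('
    · subst hop
      rw [← pvBal_open pre] at *
      simpa using hstep
    · by_cases hcl : c = ')'
      · subst hcl
        have h2 : pvBal pre - 1 = pvBal (pre ++ [')']) := (pvBal_close pre).symm
        simp only [beq_iff_eq, hop, if_false, if_true, h2]
        simpa using hstep
      · have hbal : pvBal (pre ++ [c]) = pvBal pre := pvBal_other pre c hop hcl
        rw [hbal] at hstep
        simp only [beq_iff_eq, hop, hcl, if_false, pvBal] at hstep ⊢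
        by_cases hconn : (c == '|' || c == '&' || c == '-' || c == '+') = true
        · by_cases h1 : ((pre.count '(' : Int)) - ((pre.count ')' : Int)) = 1
          · simp [hconn, h1]
          · simp [hconn, h1, hstep]
        · simp [hconn, hstep]

-- ===== VERDICT (by name: the statement is the Claim_ definition above) =====
theorem PositionMainConnector_spec : Claim_equal_PositionMainConnector := by
  intro e _
  unfold Spec_PositionMainConnector PositionMainConnector PositionMainConnector_alt
  simpa [pvBal] using pvLoopA_eq_scanB e.toList []
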